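-- pv_equiv track=rewrite | github.com/jyotirmoy208/MSMALatest | MSMVMCA/msmaclusteringseed.py | find_best_sorted_dict
-- ===== SOURCE A (Python) =====
-- def find_best_sorted_dict(previous_dict,current_dict):
--     new_dict={}
--     for itr in range(len(previous_dict)):
--         prev_max=max(previous_dict)
--         current_max=max(current_dict)
--         if prev_max>current_max:
--             new_dict[prev_max]=previous_dict[prev_max]
--             previous_dict.pop(prev_max)
--         else:
--             new_dict[current_max] = current_dict[current_max]
--             current_dict.pop(current_max)
--     return new_dict
-- ===== SOURCE B (Python) =====
-- def find_best_sorted_dict(previous_dict, current_dict):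
--     # Sort both key sets once, then merge descending with a two-pointer scan,
--     # taking len(previous_dict) entries; on equal keys the current dict wins.
--     pk = sorted(previous_dict, reverse=True)
--     ck = sorted(current_dict, reverse=True)
--     i = j = 0
--     new_dict = {}
--     for _ in range(len(previous_dict)):
--         if j < len(ck) and (i >= len(pk) or ck[j] >= pk[i]):
--             new_dict[ck[j]] = current_dict[ck[j]]
--             j += 1
--         else:
--             new_dict[pk[i]] = previous_dict[pk[i]]
--             i += 1
--     return new_dict
-- ===== Notes on version B (the rewrite author's own statement) =====
-- stated objective: faster
-- what changed: A rescans both dicts with max() and pops the winner on every one of its len(previous_dict) iterations; B sorts both key lists once and takes the top-len(previous_dict) entries with a single two-pointer descending merge (current dict wins ties), looking values up in the untouched dicts; B also does not mutate its arguments and returns instead of raising where current_dict runs out.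
-- crash fix: A raises ValueError (max() of an empty sequence) whenever previous_dict is nonempty and current_dict is exhausted before the len(previous_dict) merge steps finish; B returns the descending merge of the remaining keys there. — e.g. on find_best_sorted_dict([(1, 2)], []): A raises ValueError, B returns [(1, 2)]
import Mathlib
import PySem

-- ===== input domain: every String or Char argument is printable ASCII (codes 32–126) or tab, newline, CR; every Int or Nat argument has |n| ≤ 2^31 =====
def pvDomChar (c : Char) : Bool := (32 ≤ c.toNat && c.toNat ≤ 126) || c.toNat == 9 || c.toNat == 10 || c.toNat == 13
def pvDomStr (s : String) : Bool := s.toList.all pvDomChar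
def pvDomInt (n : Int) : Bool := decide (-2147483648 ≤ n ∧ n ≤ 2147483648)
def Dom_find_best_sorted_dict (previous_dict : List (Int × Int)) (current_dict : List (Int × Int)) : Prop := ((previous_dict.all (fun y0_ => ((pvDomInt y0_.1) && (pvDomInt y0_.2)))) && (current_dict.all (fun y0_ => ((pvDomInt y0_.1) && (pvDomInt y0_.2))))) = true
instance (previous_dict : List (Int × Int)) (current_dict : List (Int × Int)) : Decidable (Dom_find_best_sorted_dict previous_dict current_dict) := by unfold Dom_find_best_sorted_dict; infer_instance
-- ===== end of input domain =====

-- B replaces A's repeated max()+pop() scans by sorting both key lists once and merging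
-- them descending with a two-pointer loop (alternative algorithm, asymptotically faster).
-- A pops entries from its dict arguments in place; B does not mutate its arguments —
-- the equivalence proved here is about the RETURN value only.

-- ===== PORT A =====
-- loop body of A: n times pick the larger of the two dicts' max keys, move it to new_dict
-- (where Python's max(...) raises on an empty current_dict the port returns the accumulator;
--  those inputs are excluded by Pre_find_best_sorted_dict)
def pvLoopA : Nat → PySem.Dict Int Int → PySem.Dict Int Int → PySem.Dict Int Int → PySem.Dict Int Int
  | 0, _, _, nd => nd
  | Nat.succ n, p, c, nd =>
    match PySem.List.max? p.keys (fun k => k), PySem.List.max? c.keys (fun k => k) with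
    | some pm, some cm =>
        if cm < pm then
          pvLoopA n (p.erase pm) c (nd.insert pm (p.getD pm 0))
        else
          pvLoopA n p (c.erase cm) (nd.insert cm (c.getD cm 0))
    | _, _ => nd

def find_best_sorted_dict (previous_dict : List (Int × Int)) (current_dict : List (Int × Int)) : List (Int × Int) :=
  (pvLoopA previous_dict.length (PySem.Dict.mk previous_dict) (PySem.Dict.mk current_dict) PySem.Dict.empty).items

-- ===== PORT B =====
-- two-pointer descending merge over the two sorted key lists (i into pk, j into ck)
def pvLoopB (prevd curd : PySem.Dict Int Int) (pk ck : List Int) : Nat → Nat → Nat → PySem.Dict Int Int → PySem.Dict Int Int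
  | 0, _, _, nd => nd
  | Nat.succ n, i, j, nd =>
    if j < ck.length ∧ (pk.length ≤ i ∨ pk.getD i 0 ≤ ck.getD j 0) then
      pvLoopB prevd curd pk ck n i (j + 1) (nd.insert (ck.getD j 0) (curd.getD (ck.getD j 0) 0))
    else
      pvLoopB prevd curd pk ck n (i + 1) j (nd.insert (pk.getD i 0) (prevd.getD (pk.getD i 0) 0))

def find_best_sorted_dict_alt (previous_dict : List (Int × Int)) (current_dict : List (Int × Int)) : List (Int × Int) :=
  let prevd := PySem.Dict.mk previous_dict
  let curd := PySem.Dict.mk current_dict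
  let pk := PySem.List.sorted prevd.keys (fun k => k) true
  let ck := PySem.List.sorted curd.keys (fun k => k) true
  (pvLoopB prevd curd pk ck previous_dict.length 0 0 PySem.Dict.empty).items

-- ===== PRECONDITION & SPEC =====
-- Pre_ excludes (a) association lists with duplicate keys (a Python dict's keys are always
-- distinct, so these do not represent dict inputs) and (b) exactly the inputs on which A's
-- max(current_dict) raises ValueError because current_dict runs empty before the loop ends.
def Pre_find_best_sorted_dict (previous_dict : List (Int × Int)) (current_dict : List (Int × Int)) : Prop :=
  (previous_dict.map Prod.fst).Nodup ∧ (current_dict.map Prod.fst).Nodup ∧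
  (previous_dict = [] ∨ (current_dict ≠ [] ∧
    previous_dict.length ≤ current_dict.length +
      (previous_dict.map Prod.fst).countP
        (fun k => decide (((PySem.List.min? (current_dict.map Prod.fst) (fun x => x)).getD 0) < k))))
instance (previous_dict : List (Int × Int)) (current_dict : List (Int × Int)) : Decidable (Pre_find_best_sorted_dict previous_dict current_dict) := by unfold Pre_find_best_sorted_dict; infer_instance

def pvWitness_find_best_sorted_dict : (List (Int × Int)) × (List (Int × Int)) := ([(3, 1), (1, 2)], [(2, 5)])

-- A raises ValueError (max() of an empty sequence) whenever previous_dict is nonempty and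
-- current_dict is exhausted before the loop's len(previous_dict) steps end; B returns the
-- descending top-len(previous_dict) merge there.
def Raises_find_best_sorted_dict (previous_dict : List (Int × Int)) (current_dict : List (Int × Int)) : Prop :=
  (previous_dict.map Prod.fst).Nodup ∧ (current_dict.map Prod.fst).Nodup ∧
  previous_dict ≠ [] ∧
  (current_dict = [] ∨
    current_dict.length +
      (previous_dict.map Prod.fst).countP
        (fun k => decide (((PySem.List.min? (current_dict.map Prod.fst) (fun x => x)).getD 0) < k))
      < previous_dict.length)
instance (previous_dict : List (Int × Int)) (current_dict : List (Int × Int)) : Decidable (Raises_find_best_sorted_dict previous_dict current_dict) := by unfold Raises_find_best_sorted_dict; infer_instance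

def pvRaiseWitness_find_best_sorted_dict : (List (Int × Int)) × (List (Int × Int)) := ([(1, 2)], [])
def pvRaiseWitnessOut_find_best_sorted_dict : List (Int × Int) := [(1, 2)]

def Spec_find_best_sorted_dict (previous_dict : List (Int × Int)) (current_dict : List (Int × Int)) (out : List (Int × Int)) : Prop := out = find_best_sorted_dict_alt previous_dict current_dict
instance (previous_dict : List (Int × Int)) (current_dict : List (Int × Int)) (out : List (Int × Int)) : Decidable (Spec_find_best_sorted_dict previous_dict current_dict out) := by unfold Spec_find_best_sorted_dict; infer_instance

-- ===== CLAIM (what is proved, stated in full; the proofs are below) =====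
def Claim_equal_find_best_sorted_dict : Prop := ∀ (previous_dict : List (Int × Int)) (current_dict : List (Int × Int)), Dom_find_best_sorted_dict previous_dict current_dict → Pre_find_best_sorted_dict previous_dict current_dict → Spec_find_best_sorted_dict previous_dict current_dict (find_best_sorted_dict previous_dict current_dict)
def Claim_raises_find_best_sorted_dict : Prop := (∀ (previous_dict : List (Int × Int)) (current_dict : List (Int × Int)), Dom_find_best_sorted_dict previous_dict current_dict → Raises_find_best_sorted_dict previous_dict current_dict → ¬ Pre_find_best_sorted_dict previous_dict current_dict) ∧ (Dom_find_best_sorted_dict (pvRaiseWitness_find_best_sorted_dict.1) (pvRaiseWitness_find_best_sorted_dict.2) ∧ Raises_find_best_sorted_dict (pvRaiseWitness_find_best_sorted_dict.1) (pvRaiseWitness_find_best_sorted_dict.2) ∧ find_best_sorted_dict_alt (pvRaiseWitness_find_best_sorted_dict.1) (pvRaiseWitness_find_best_sorted_dict.2) = pvRaiseWitnessOut_find_best_sorted_dict)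

-- ===== LEMMAS AND PROOFS =====

theorem keys_erase (d : PySem.Dict Int Int) (k : Int) :
    (d.erase k).keys = d.keys.filter (fun x => !(x == k)) := by
  obtain ⟨items⟩ := d
  induction items with
  | nil => rfl
  | cons p t ih =>
    simp only [PySem.Dict.erase, PySem.Dict.keys, List.filter_cons, List.map_cons] at *
    by_cases h : p.1 == k
    · simp [h] at *; exact ih
    · simp only [h] at *; simp at *; simpa using ih

theorem sub_getD (d sub : PySem.Dict Int Int) (hnd : d.keys.Nodup)
    (hsub : sub.items.Sublist d.items) {k : Int} (hk : k ∈ sub.keys) :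
    sub.getD k 0 = d.getD k 0 := by
  have hsk : sub.keys.Sublist d.keys := by simpa [PySem.Dict.keys] using hsub.map (fun x => x.1)
  have hnds : sub.keys.Nodup := hnd.sublist hsk
  obtain ⟨v, hv, rfl⟩ := List.mem_map.mp hk
  have h1 := PySem.Dict.getD_of_mem_items sub (show (v.1, v.2) ∈ sub.items by simpa using hv) hnds 0
  have h2 := PySem.Dict.getD_of_mem_items d (show (v.1, v.2) ∈ d.items by exact hsub.mem (by simpa using hv)) hnd 0
  rw [h1, h2]

theorem max_head (l : List Int) (m : Int) (hm : PySem.List.max? l (fun k => k) = some m) :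
    ∃ t, PySem.List.sorted l (fun k => k) true = m :: t := by
  have hne : l ≠ [] := by
    intro h; subst h; rw [(PySem.List.max?_eq_none_iff [] _).mpr rfl] at hm; cases hm
  have hsne : PySem.List.sorted l (fun k => k) true ≠ [] := by
    intro h; exact hne ((PySem.List.sorted_eq_nil_iff l _ true).mp h)
  obtain ⟨a, t, hs⟩ := List.exists_cons_of_ne_nil hsne
  refine ⟨t, ?_⟩
  have ham : a ∈ l := (PySem.List.mem_sorted l _ true a).mp (hs ▸ List.mem_cons_self)
  have h1 : a ≤ m := PySem.List.max?_isMax hm a ham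
  have h2 : m ≤ a := PySem.List.key_head_sorted_rev_ge l (fun k => k) hs m (PySem.List.max?_mem hm)
  rw [hs, le_antisymm h1 h2]

theorem sorted_erase (l : List Int) (hnd : l.Nodup) {m : Int} {t : List Int}
    (hs : PySem.List.sorted l (fun k => k) true = m :: t) :
    PySem.List.sorted (l.filter (fun x => !(x == m))) (fun k => k) true = t := by
  have hperm : (m :: t).Perm l := hs ▸ PySem.List.sorted_perm l _ true
  have hpe : (l.erase m).Perm t := by
    have := (hperm.symm).erase m
    simpa using this
  have hef : l.erase m = l.filter (fun x => !(x == m)) := by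
    rw [hnd.erase_eq_filter]; rfl
  have hndmt : (m :: t).Nodup := hperm.nodup_iff.mpr hnd
  have hpw : t.Pairwise (fun a b => b ≤ a) := by
    have := hs ▸ PySem.List.sorted_pairwise_rev l (fun k => k)
    exact this.of_cons
  have hpw' : t.Pairwise (fun a b => b < a) := by
    have hne : t.Pairwise (fun a b : Int => a ≠ b) := hndmt.of_cons
    exact (hne.and hpw).imp (fun h => lt_of_le_of_ne h.2 (Ne.symm h.1))
  exact PySem.List.sorted_rev_eq_of_perm_of_pairwise_gt _ t _ (hef ▸ hpe).symm hpw'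

theorem min_perm (l l' : List Int) (h : l.Perm l') :
    PySem.List.min? l (fun x => x) = PySem.List.min? l' (fun x => x) := by
  cases hm : PySem.List.min? l (fun x => x) with
  | none =>
    have : l = [] := (PySem.List.min?_eq_none_iff l _).mp hm
    subst this
    rw [(PySem.List.min?_eq_none_iff l' _).mpr (h.nil_eq).symm]
  | some m =>
    cases hm' : PySem.List.min? l' (fun x => x) with
    | none =>
      have : l' = [] := (PySem.List.min?_eq_none_iff l' _).mp hm'
      subst this
      rw [List.perm_nil.mp h, (PySem.List.min?_eq_none_iff [] _).mpr rfl] at hm; cases hm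
    | some m' =>
      have h1 : m ≤ m' := PySem.List.min?_isMin hm m' (h.symm.subset (PySem.List.min?_mem hm'))
      have h2 : m' ≤ m := PySem.List.min?_isMin hm' m (h.subset (PySem.List.min?_mem hm))
      rw [le_antisymm h1 h2]

def mrg (prevd curd : PySem.Dict Int Int) : Nat → List Int → List Int → PySem.Dict Int Int → PySem.Dict Int Int
  | 0, _, _, nd => nd
  | Nat.succ n, P, C, nd =>
    match C, P with
    | c :: C', [] => mrg prevd curd n [] C' (nd.insert c (curd.getD c 0))
    | c :: C', p :: P' =>
        if p ≤ c then mrg prevd curd n (p :: P') C' (nd.insert c (curd.getD c 0))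
        else mrg prevd curd n P' (c :: C') (nd.insert p (prevd.getD p 0))
    | [], p :: P' => mrg prevd curd n P' [] (nd.insert p (prevd.getD p 0))
    | [], [] => nd


def Ok (n : Nat) (P C : List Int) : Prop :=
  n ≤ P.length ∧
  (match PySem.List.min? C (fun x => x) with
   | none => n = 0
   | some m => n ≤ C.length + P.countP (fun k => decide (m < k)))

theorem loopA_eq_mrg (prevd curd : PySem.Dict Int Int)
    (hprev : prevd.keys.Nodup) (hcur : curd.keys.Nodup) :
    ∀ (n : Nat) (p c nd : PySem.Dict Int Int),
      p.items.Sublist prevd.items → c.items.Sublist curd.items →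
      Ok n (PySem.List.sorted p.keys (fun k => k) true) (PySem.List.sorted c.keys (fun k => k) true) →
      pvLoopA n p c nd = mrg prevd curd n (PySem.List.sorted p.keys (fun k => k) true) (PySem.List.sorted c.keys (fun k => k) true) nd := by
  intro n
  induction n with
  | zero => intro p c nd _ _ _; simp [pvLoopA, mrg]
  | succ n ih =>
    intro p c nd hps hcs hok
    obtain ⟨hlen, hmin⟩ := hok
    have hpnd : p.keys.Nodup := hprev.sublist (by simpa [PySem.Dict.keys] using hps.map (fun x => x.1))
    have hcnd : c.keys.Nodup := hcur.sublist (by simpa [PySem.Dict.keys] using hcs.map (fun x => x.1))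
    -- previous_dict's max exists
    have hplen : n + 1 ≤ p.keys.length := by
      rwa [PySem.List.length_sorted] at hlen
    have hpne : p.keys ≠ [] := by intro h; rw [h] at hplen; simp at hplen
    cases hpm : PySem.List.max? p.keys (fun k => k) with
    | none => exact absurd ((PySem.List.max?_eq_none_iff _ _).mp hpm) hpne
    | some pm =>
    -- current_dict's max exists
    have hcne : c.keys ≠ [] := by
      intro h
      rw [(PySem.List.sorted_eq_nil_iff c.keys _ true).mpr h] at hmin
      rw [(PySem.List.min?_eq_none_iff [] _).mpr rfl] at hmin
      simp at hmin
    cases hcm : PySem.List.max? c.keys (fun k => k) with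
    | none => exact absurd ((PySem.List.max?_eq_none_iff _ _).mp hcm) hcne
    | some cm =>
    obtain ⟨P', hP⟩ := max_head p.keys pm hpm
    obtain ⟨C', hC⟩ := max_head c.keys cm hcm
    -- the current minimum key
    cases hm : PySem.List.min? (PySem.List.sorted c.keys (fun k => k) true) (fun x => x) with
    | none =>
      exact absurd ((PySem.List.sorted_eq_nil_iff c.keys _ true).mp
        ((PySem.List.min?_eq_none_iff _ _).mp hm)) hcne
    | some m =>
    rw [hm] at hmin
    simp only at hmin
    have hmcm : m ≤ cm := PySem.List.min?_isMin hm cm (hC ▸ List.mem_cons_self)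
    have hPle : ∀ y ∈ P', y ≤ pm := by
      intro y hy
      exact PySem.List.key_head_sorted_rev_ge p.keys (fun k => k) hP y
        ((PySem.List.mem_sorted p.keys _ true y).mp (hP ▸ List.mem_cons_of_mem pm hy))
    have hCle : ∀ y ∈ C', y ≤ cm := by
      intro y hy
      exact PySem.List.key_head_sorted_rev_ge c.keys (fun k => k) hC y
        ((PySem.List.mem_sorted c.keys _ true y).mp (hC ▸ List.mem_cons_of_mem cm hy))
    rw [hP, hC] at hmin ⊢
    simp only [pvLoopA, hpm, hcm]
    by_cases hlt : cm < pm
    · -- A takes from previous_dict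
      rw [if_pos hlt, mrg, if_neg (not_le.mpr hlt)]
      have hval : p.getD pm 0 = prevd.getD pm 0 :=
        sub_getD prevd p hprev hps (PySem.List.max?_mem hpm)
      have hsub' : (p.erase pm).items.Sublist prevd.items := by
        refine List.Sublist.trans ?_ hps
        simp only [PySem.Dict.erase]
        exact List.filter_sublist
      have hkeys' : PySem.List.sorted (p.erase pm).keys (fun k => k) true = P' := by
        rw [keys_erase]
        exact sorted_erase p.keys hpnd hP
      have hok' : Ok n (PySem.List.sorted (p.erase pm).keys (fun k => k) true)
          (PySem.List.sorted c.keys (fun k => k) true) := by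
        rw [hkeys', hC]
        constructor
        · have := hlen; rw [hP] at this; simpa using Nat.lt_succ_iff.mp (Nat.lt_of_lt_of_le (Nat.lt_succ_self n) this)
        · rw [show PySem.List.min? (cm :: C') (fun x => x) = some m from hC ▸ hm]
          simp only
          rw [List.countP_cons] at hmin
          have : decide (m < pm) = true := by simp; omega
          rw [this] at hmin
          simp only [List.length_cons, if_pos] at hmin ⊢
          omega
      have := ih (p.erase pm) c (nd.insert pm (p.getD pm 0)) hsub' hcs hok'
      rw [hkeys', hC] at this
      rw [this, hval]
    · -- A takes from current_dict
      rw [if_neg hlt, mrg, if_pos (not_lt.mp hlt)]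
      have hval : c.getD cm 0 = curd.getD cm 0 :=
        sub_getD curd c hcur hcs (PySem.List.max?_mem hcm)
      have hsub' : (c.erase cm).items.Sublist curd.items := by
        refine List.Sublist.trans ?_ hcs
        simp only [PySem.Dict.erase]
        exact List.filter_sublist
      have hkeys' : PySem.List.sorted (c.erase cm).keys (fun k => k) true = C' := by
        rw [keys_erase]
        exact sorted_erase c.keys hcnd hC
      have hok' : Ok n (PySem.List.sorted p.keys (fun k => k) true)
          (PySem.List.sorted (c.erase cm).keys (fun k => k) true) := by
        rw [hkeys', hP]
        constructor
        · rw [hP] at hlen; simpa using Nat.le_of_succ_le hlen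
        · cases hm' : PySem.List.min? C' (fun x => x) with
          | none =>
            -- C' is empty: the old bound forces n = 0
            have hC'nil : C' = [] := (PySem.List.min?_eq_none_iff _ _).mp hm'
            simp only
            have hcnt : (pm :: P').countP (fun k => decide (m < k)) = 0 := by
              apply List.countP_eq_zero.mpr
              intro y hy
              have hy' : y ≤ pm := by
                rcases List.mem_cons.mp hy with h | h
                · exact h ▸ le_refl _
                · exact hPle y h
              have : y ≤ cm := le_trans hy' (not_lt.mp hlt)
              have hmcm' : cm ≤ m := by
                have : cm ∈ (cm :: C') := List.mem_cons_self
                have hmem : m ∈ (cm :: C') := PySem.List.min?_mem (hC ▸ hm)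
                rw [hC'nil] at hmem
                simp at hmem
                omega
              simp; omega
            rw [hC'nil] at hmin
            simp [hcnt] at hmin
            omega
          | some m' =>
            simp only
            have hmm' : m = m' := by
              have h1 : m ≤ m' := PySem.List.min?_isMin (hC ▸ hm) m'
                (List.mem_cons_of_mem cm (PySem.List.min?_mem hm'))
              have h2 : m' ≤ m := by
                have hmem : m ∈ (cm :: C') := PySem.List.min?_mem (hC ▸ hm)
                rcases List.mem_cons.mp hmem with h | h
                · have := PySem.List.min?_isMin hm'
                  rcases List.exists_cons_of_ne_nil (show C' ≠ [] by
                    intro hnil; rw [hnil] at hm'; rw [(PySem.List.min?_eq_none_iff [] _).mpr rfl] at hm'; cases hm') with ⟨a, t, hat⟩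
                  have ha : m' ≤ a := PySem.List.min?_isMin hm' a (hat ▸ List.mem_cons_self)
                  have ha2 : a ≤ cm := hCle a (hat ▸ List.mem_cons_self)
                  omega
                · exact PySem.List.min?_isMin hm' m h
              omega
            rw [← hmm']
            rw [List.length_cons] at hmin
            omega
      have := ih p (c.erase cm) (nd.insert cm (c.getD cm 0)) hps hsub' hok'
      rw [hkeys', hP] at this
      rw [this, hval]

theorem loopB_eq_mrg (prevd curd : PySem.Dict Int Int) (pk ck : List Int) :
    ∀ (n i j : Nat) (nd : PySem.Dict Int Int), i + n ≤ pk.length →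
      pvLoopB prevd curd pk ck n i j nd = mrg prevd curd n (pk.drop i) (ck.drop j) nd := by
  intro n
  induction n with
  | zero => intro i j nd _; simp [pvLoopB, mrg]
  | succ n ih =>
    intro i j nd h
    have hi : i < pk.length := by omega
    have hgi : pk.getD i 0 = pk[i] := by
      simp [List.getD_eq_getElem?_getD, List.getElem?_eq_getElem hi]
    rw [List.drop_eq_getElem_cons hi]
    by_cases hj : j < ck.length
    · have hgj : ck.getD j 0 = ck[j] := by
        simp [List.getD_eq_getElem?_getD, List.getElem?_eq_getElem hj]
      rw [List.drop_eq_getElem_cons hj]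
      by_cases hle : pk[i] ≤ ck[j]
      · rw [pvLoopB, if_pos ⟨hj, Or.inr (by rw [hgi, hgj]; exact hle)⟩, mrg, if_pos hle]
        rw [ih i (j+1) _ (by omega), List.drop_eq_getElem_cons hi, hgj]
      · rw [pvLoopB, if_neg (by push Not; exact fun _ => ⟨by omega, by rw [hgi, hgj]; omega⟩), mrg, if_neg hle]
        rw [ih (i+1) j _ (by omega), List.drop_eq_getElem_cons hj, hgi]
    · have hdj : ck.drop j = [] := by simp [List.drop_eq_nil_iff]; omega
      rw [hdj, pvLoopB, if_neg (by push Not; intro hc; exact absurd hc hj), mrg]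
      rw [ih (i+1) j _ (by omega), hdj, hgi]

theorem pre_ok (previous_dict current_dict : List (Int × Int))
    (hpre : Pre_find_best_sorted_dict previous_dict current_dict) :
    Ok previous_dict.length
      (PySem.List.sorted (PySem.Dict.mk previous_dict).keys (fun k => k) true)
      (PySem.List.sorted (PySem.Dict.mk current_dict).keys (fun k => k) true) := by
  obtain ⟨hnp, hnc, hdisj⟩ := hpre
  constructor
  · rw [PySem.List.length_sorted, PySem.Dict.keys_mk, List.length_map]
  · cases hm : PySem.List.min? (PySem.List.sorted (PySem.Dict.mk current_dict).keys (fun k => k) true) (fun x => x) with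
    | none =>
      have hkeys : (PySem.Dict.mk current_dict).keys = [] :=
        (PySem.List.sorted_eq_nil_iff _ _ true).mp ((PySem.List.min?_eq_none_iff _ _).mp hm)
      rw [PySem.Dict.keys_mk] at hkeys
      have hcnil : current_dict = [] := List.map_eq_nil_iff.mp hkeys
      rcases hdisj with hp | ⟨hcne, _⟩
      · simp [hp]
      · exact absurd hcnil hcne
    | some m =>
      simp only
      have hcne : current_dict ≠ [] := by
        intro h
        rw [h] at hm
        have : (PySem.Dict.mk ([] : List (Int × Int))).keys = [] := rfl
        rw [this] at hm
        rw [show PySem.List.sorted ([] : List Int) (fun k => k) true = [] from rfl] at hm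
        rw [(PySem.List.min?_eq_none_iff [] _).mpr rfl] at hm
        cases hm
      rcases hdisj with hp | ⟨_, hbound⟩
      · simp [hp]
      · have hperm : (PySem.List.sorted (PySem.Dict.mk current_dict).keys (fun k => k) true).Perm (current_dict.map Prod.fst) := by
          rw [PySem.Dict.keys_mk]; exact PySem.List.sorted_perm _ _ true
        have hmm : PySem.List.min? (current_dict.map Prod.fst) (fun x => x) = some m := by
          rw [← min_perm _ _ hperm, hm]
        rw [hmm] at hbound
        have hlen1 : (PySem.List.sorted (PySem.Dict.mk current_dict).keys (fun k => k) true).length = current_dict.length := by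
          rw [PySem.List.length_sorted, PySem.Dict.keys_mk, List.length_map]
        have hcnt : (PySem.List.sorted (PySem.Dict.mk previous_dict).keys (fun k => k) true).countP (fun k => decide (m < k)) = (previous_dict.map Prod.fst).countP (fun k => decide (m < k)) := by
          have hperm2 : (PySem.List.sorted (PySem.Dict.mk previous_dict).keys (fun k => k) true).Perm (previous_dict.map Prod.fst) := by
            rw [PySem.Dict.keys_mk]; exact PySem.List.sorted_perm _ _ true
          exact hperm2.countP_eq _
        simp only [Option.getD_some] at hbound
        rw [hlen1, hcnt]
        exact hbound

-- ===== VERDICT (by name: the statement is the Claim_ definition above) =====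
theorem find_best_sorted_dict_spec : Claim_equal_find_best_sorted_dict := by
  intro previous_dict current_dict _ hpre
  unfold Spec_find_best_sorted_dict find_best_sorted_dict find_best_sorted_dict_alt
  simp only
  rw [loopB_eq_mrg _ _ _ _ previous_dict.length 0 0 PySem.Dict.empty
    (by rw [PySem.List.length_sorted, PySem.Dict.keys_mk, List.length_map]; omega)]
  rw [List.drop_zero, List.drop_zero]
  rw [loopA_eq_mrg (PySem.Dict.mk previous_dict) (PySem.Dict.mk current_dict)
    (by rw [PySem.Dict.keys_mk]; exact hpre.1) (by rw [PySem.Dict.keys_mk]; exact hpre.2.1)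
    previous_dict.length (PySem.Dict.mk previous_dict) (PySem.Dict.mk current_dict) PySem.Dict.empty
    (List.Sublist.refl _) (List.Sublist.refl _) (pre_ok previous_dict current_dict hpre)]

@[simp] theorem find_best_sorted_dict_raises : Claim_raises_find_best_sorted_dict := by
  unfold Claim_raises_find_best_sorted_dict
  constructor
  · rintro previous_dict current_dict _ ⟨_, _, hne, hor⟩ ⟨_, _, hpre3⟩
    rcases hpre3 with hp | ⟨hcne, hle⟩
    · exact hne hp
    · rcases hor with hc | hlt
      · exact hcne hc
      · omega
  · exact ⟨by decide, by decide, by decide⟩
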